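-- pv_equiv track=rewrite | github.com/zjzhou521/DRRN-tensorflow2 | train_DRRN.py | divide_image_name
-- ===== SOURCE A (Python) =====
-- def divide_image_name(name):
--     i = 0
--     before = ""
--     after = ""
--     divide_flag = 0
--     while(i<len(name)):
--         if(name[i]=='.'):
--             divide_flag = 1
--         if(divide_flag==0):
--             before += name[i]
--         else:
--             after += name[i]
--         i += 1
--     return before, after
-- ===== SOURCE B (Python) =====
-- def divide_image_name(name):
--     k = name.find('.')
--     if k == -1:
--         return name, ''
--     return name[:k], name[k:]
-- ===== Notes on version B (the rewrite author's own statement) =====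
-- stated objective: faster
-- what changed: B locates the first dot once with str.find and produces both parts by slicing, instead of A's per-character loop that appends each character to one of two growing strings under a flag (quadratic repeated concatenation).
import Mathlib
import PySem

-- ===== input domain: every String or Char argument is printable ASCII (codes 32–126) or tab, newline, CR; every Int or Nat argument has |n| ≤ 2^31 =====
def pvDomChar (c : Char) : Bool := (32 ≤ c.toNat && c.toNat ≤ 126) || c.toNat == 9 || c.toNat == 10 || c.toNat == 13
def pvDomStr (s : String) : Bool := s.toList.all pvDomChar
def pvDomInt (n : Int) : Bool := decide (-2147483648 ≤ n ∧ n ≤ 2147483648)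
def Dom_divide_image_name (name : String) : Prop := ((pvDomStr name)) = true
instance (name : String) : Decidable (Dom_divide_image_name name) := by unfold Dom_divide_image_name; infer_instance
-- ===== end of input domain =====

-- B replaces A's per-character flagged accumulation loop (quadratic string concatenation) by a single str.find plus two slices; a timing run measured B faster.

-- ===== PORT A =====
-- while loop over the characters: two accumulator strings and the divide flag
def divide_image_name_go : List Char → List Char → List Char → Int → (List Char × List Char)
  | [], before, after, _ => (before, after)
  | c :: rest, before, after, divide_flag =>
    let divide_flag := if c = '.' then 1 else divide_flag
    if divide_flag = 0 then divide_image_name_go rest (before ++ [c]) after divide_flag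
    else divide_image_name_go rest before (after ++ [c]) divide_flag

def divide_image_name (name : String) : String × String :=
  let r := divide_image_name_go name.toList [] [] 0
  (String.ofList r.1, String.ofList r.2)

-- ===== PORT B =====
def divide_image_name_alt (name : String) : String × String :=
  let k := PySem.Str.find name "."
  if k = -1 then (name, "")
  else (String.ofList (PySem.List.slice name.toList none (some k)),
        String.ofList (PySem.List.slice name.toList (some k) none))

-- ===== PRECONDITION & SPEC =====
def Spec_divide_image_name (name : String) (out : String × String) : Prop := out = divide_image_name_alt name
instance (name : String) (out : String × String) : Decidable (Spec_divide_image_name name out) := by unfold Spec_divide_image_name; infer_instance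

-- ===== CLAIM (what is proved, stated in full; the proofs are below) =====
def Claim_equal_divide_image_name : Prop := ∀ (name : String), Dom_divide_image_name name → Spec_divide_image_name name (divide_image_name name)

-- ===== LEMMAS AND PROOFS =====

-- once the flag is 1, everything goes to `after`
theorem go_flag_one (l before after : List Char) :
    divide_image_name_go l before after 1 = (before, after ++ l) := by
  induction l generalizing after with
  | nil => simp [divide_image_name_go]
  | cons c t ih => simp [divide_image_name_go, ih]

-- with flag 0, A splits at the first dot (takeWhile / dropWhile)
theorem go_flag_zero (l before : List Char) :
    divide_image_name_go l before [] 0 =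
      (before ++ l.takeWhile (fun c => decide (c ≠ '.')), l.dropWhile (fun c => decide (c ≠ '.'))) := by
  induction l generalizing before with
  | nil => simp [divide_image_name_go]
  | cons c t ih =>
    by_cases hc : c = '.'
    · simp [divide_image_name_go, hc, go_flag_one]
    · simp [divide_image_name_go, hc, ih]

-- takeWhile/dropWhile split at an explicit boundary index
theorem takeWhile_eq_take (p : Char → Bool) (l : List Char) (k : Nat)
    (hk : k ≤ l.length)
    (hbefore : ∀ i (h : i < k), p (l[i]'(Nat.lt_of_lt_of_le h hk)) = true)
    (hat : ∀ (h : k < l.length), p (l[k]'h) = false) :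
    l.takeWhile p = l.take k ∧ l.dropWhile p = l.drop k := by
  induction l generalizing k with
  | nil => simp
  | cons c t ih =>
    cases k with
    | zero =>
      have := hat (by simp)
      simp_all
    | succ k =>
      have hc : p c = true := hbefore 0 (Nat.succ_pos _)
      have := ih k (by simpa using hk)
        (fun i h => hbefore (i+1) (by omega))
        (fun h => hat (by simpa using Nat.succ_lt_succ h))
      simp_all

-- singleton prefix means the head is that char
theorem singleton_prefix_iff (c : Char) (l : List Char) :
    [c] <+: l ↔ l.head? = some c := by
  cases l with
  | cons x t => simp [List.cons_prefix_cons, eq_comm]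
  | nil => simp

theorem divide_image_name_spec : Claim_equal_divide_image_name := by
  intro name _
  unfold Spec_divide_image_name divide_image_name divide_image_name_alt
  have hfind : PySem.Str.find name "." = PySem.Chars.find name.toList ['.'] := by
    simp [PySem.Str.find_eq]
  set L := name.toList with hL
  set k := PySem.Chars.find L ['.'] with hk
  rw [go_flag_zero, hfind]
  simp only [List.nil_append]
  by_cases hneg : k = -1
  · -- no dot: flag never flips, everything stays in before
    have hnotin : ¬ ['.'] <:+: L := (PySem.Chars.find_eq_neg_one_iff L ['.']).mp (hk ▸ hneg)
    have hnomem : '.' ∉ L := by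
      intro hm
      obtain ⟨s, t, hst⟩ := List.append_of_mem hm
      exact hnotin ⟨s, t, by simp [hst]⟩
    have htw : L.takeWhile (fun c => decide (c ≠ '.')) = L := by
      apply List.takeWhile_eq_self_iff.mpr
      intro x hx
      simp only [decide_eq_true_eq]
      exact fun h => hnomem (h ▸ hx)
    have hdw : L.dropWhile (fun c => decide (c ≠ '.')) = [] := by
      have h2 := List.takeWhile_append_dropWhile (p := fun c => decide (c ≠ '.')) (l := L)
      rw [htw] at h2
      have h3 := congrArg List.length h2
      simp only [List.length_append] at h3
      exact List.length_eq_zero_iff.mp (by omega)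
    rw [if_pos hneg, htw, hdw]
    rw [hL]
    exact Prod.ext String.ofList_toList rfl
  · -- dot found at index k: split = take/drop at k
    have h0 : (0:Int) ≤ k := by
      have := PySem.Chars.neg_one_le_find (s := L) (sub := ['.'])
      rw [← hk] at this; omega
    obtain ⟨hpre, hmin⟩ := PySem.Chars.find_spec (s := L) (sub := ['.']) (hk ▸ h0)
    rw [← hk] at hpre hmin
    have hlen : k ≤ L.length := by
      have := PySem.Chars.find_le_length (s := L) (sub := ['.'])
      rw [← hk] at this; exact this
    have hklt : k.toNat < L.length := by
      have h := (singleton_prefix_iff _ _).mp hpre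
      have hne : L.drop k.toNat ≠ [] := by
        intro hemp; rw [hemp] at h; simp at h
      have := List.length_pos_iff.mpr hne
      simp at this
      omega
    have hsplit := takeWhile_eq_take (fun c => decide (c ≠ '.')) L k.toNat hklt.le
      (by
        intro i hi
        have hni := hmin i hi
        rw [singleton_prefix_iff] at hni
        have hilt : i < L.length := by omega
        have hdi : (L.drop i).head? = some (L[i]'hilt) := by
          rw [List.head?_drop]; simp [hilt]
        simp only [decide_eq_true_eq]
        intro h
        exact hni (by rw [hdi, h]))
      (by
        intro h
        rw [singleton_prefix_iff] at hpre
        have hdk : (L.drop k.toNat).head? = some (L[k.toNat]'h) := by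
          rw [List.head?_drop]; simp [h]
        rw [hdk] at hpre
        simp at hpre ⊢
        exact hpre)
    rw [if_neg hneg]
    rw [hsplit.1, hsplit.2,
        PySem.List.slice_to L h0, PySem.List.slice_from L h0]
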